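-- pv_equiv track=rewrite | github.com/DEVAIEXP/sup-toolbox | src/sup_toolbox/modules/MoDControlTile/mod_controlnet_tile_sr_sdxl.py | _calculate_tile_positions
-- ===== SOURCE A (Python) =====
-- from typing import Any, Callable, Dict, List, Optional, Tuple, Union
--
-- def _calculate_tile_positions(image_dim: int, tile_dim: int, overlap: int) -> List[int]:
--     """
--     Calculates the starting positions for tiles along one dimension.
--     """
--     if image_dim <= tile_dim:
--         return [0]
--
--     positions = []
--     current_pos = 0
--     stride = tile_dim - overlap
--
--     while True:
--         positions.append(current_pos)
--         if current_pos + tile_dim >= image_dim: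
--             break
--
--         current_pos += stride
--         if current_pos > image_dim - tile_dim:
--             break
--
--     last_pos = positions[-1]
--     if last_pos + tile_dim < image_dim:
--         positions.append(image_dim - tile_dim)
--
--     return sorted(set(positions))
-- ===== SOURCE B (Python) =====
-- def _calculate_tile_positions(image_dim: int, tile_dim: int, overlap: int):
--     """Closed-form tile count: n = L // stride full strides, emit k*stride for k in 0..n,
--     and append the flush-right position L only when L is not itself a stride multiple.
--     The list is built already sorted and duplicate-free, so no set or sort is needed."""
--     if image_dim <= tile_dim:
--         return [0]
--     stride = tile_dim - overlap
--     L = image_dim - tile_dim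
--     n = L // stride
--     positions = [k * stride for k in range(n + 1)]
--     if L % stride:
--         positions.append(L)
--     return positions
-- ===== Notes on version B (the rewrite author's own statement) =====
-- stated objective: simpler
-- what changed: Replaces A's while-loop with break conditions followed by a set-dedup and sort by a closed-form tile count n = L // stride, emitting the positions k*stride already in sorted order and appending L only when it is not a stride multiple, so no set and no sort are needed.
import Mathlib
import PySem

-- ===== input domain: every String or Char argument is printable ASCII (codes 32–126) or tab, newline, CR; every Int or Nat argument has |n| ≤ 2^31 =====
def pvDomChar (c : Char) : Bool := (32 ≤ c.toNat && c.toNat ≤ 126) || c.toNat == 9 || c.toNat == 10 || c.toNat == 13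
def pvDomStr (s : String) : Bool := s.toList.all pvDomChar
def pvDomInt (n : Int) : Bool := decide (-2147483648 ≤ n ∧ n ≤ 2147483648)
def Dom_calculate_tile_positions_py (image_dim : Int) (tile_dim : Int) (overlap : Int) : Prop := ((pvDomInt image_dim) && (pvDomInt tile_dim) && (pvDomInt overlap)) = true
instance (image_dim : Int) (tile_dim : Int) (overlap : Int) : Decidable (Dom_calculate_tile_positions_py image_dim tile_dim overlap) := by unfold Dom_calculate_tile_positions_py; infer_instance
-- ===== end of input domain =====

-- B replaces A's while-loop with breaks plus set-dedup-and-sort by a closed-form tile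
-- count n = L // stride, emitting k*stride already sorted and appending L only when it
-- is not a stride multiple — no set and no sort (simpler).

-- ===== PORT A =====
-- the 'while True' loop of A: emits current_pos, breaks as A does; fuel bounds the
-- iteration count (always sufficient under Pre_, where stride > 0)
def tileLoopA (image_dim tile_dim stride : Int) : Nat → Int → List Int
  | 0, cur => [cur]
  | fuel + 1, cur =>
    if image_dim ≤ cur + tile_dim then [cur]
    else if image_dim - tile_dim < cur + stride then [cur]
    else cur :: tileLoopA image_dim tile_dim stride fuel (cur + stride)

def calculate_tile_positions_py (image_dim : Int) (tile_dim : Int) (overlap : Int) : List Int :=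
  if image_dim ≤ tile_dim then [0]
  else
    let stride := tile_dim - overlap
    let positions := tileLoopA image_dim tile_dim stride ((image_dim - tile_dim).toNat + 1) 0
    let last_pos := positions.getLastD 0  -- positions[-1]; the loop output is never empty
    let positions := if last_pos + tile_dim < image_dim then positions ++ [image_dim - tile_dim] else positions
    PySem.List.sorted (PySem.Set.ofList positions) (fun x => x)

-- ===== PORT B =====
def calculate_tile_positions_py_alt (image_dim : Int) (tile_dim : Int) (overlap : Int) : List Int :=
  if image_dim ≤ tile_dim then [0]
  else
    let stride := tile_dim - overlap
    let L := image_dim - tile_dim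
    let n := PySem.Int.floordiv L stride
    let positions := (PySem.List.pyRange 0 (n + 1) 1).map (fun k => k * stride)
    if PySem.Int.mod L stride ≠ 0 then positions ++ [L] else positions

-- ===== PRECONDITION & SPEC =====
-- Pre_ excludes overlap ≥ tile_dim when image_dim > tile_dim: there stride ≤ 0, A's while
-- loop never terminates (and B's floor division by stride = 0 raises ZeroDivisionError).
def Pre_calculate_tile_positions_py (image_dim : Int) (tile_dim : Int) (overlap : Int) : Prop :=
  image_dim ≤ tile_dim ∨ overlap < tile_dim
instance (image_dim : Int) (tile_dim : Int) (overlap : Int) : Decidable (Pre_calculate_tile_positions_py image_dim tile_dim overlap) := by unfold Pre_calculate_tile_positions_py; infer_instance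

def pvWitness_calculate_tile_positions_py : Int × Int × Int := (10, 4, 1)

def Spec_calculate_tile_positions_py (image_dim : Int) (tile_dim : Int) (overlap : Int) (out : List Int) : Prop := out = calculate_tile_positions_py_alt image_dim tile_dim overlap
instance (image_dim : Int) (tile_dim : Int) (overlap : Int) (out : List Int) : Decidable (Spec_calculate_tile_positions_py image_dim tile_dim overlap out) := by unfold Spec_calculate_tile_positions_py; infer_instance

-- ===== CLAIM (what is proved, stated in full; the proofs are below) =====
def Claim_equal_calculate_tile_positions_py : Prop := ∀ (image_dim : Int) (tile_dim : Int) (overlap : Int), Dom_calculate_tile_positions_py image_dim tile_dim overlap → Pre_calculate_tile_positions_py image_dim tile_dim overlap → Spec_calculate_tile_positions_py image_dim tile_dim overlap (calculate_tile_positions_py image_dim tile_dim overlap)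

-- ===== LEMMAS AND PROOFS =====

lemma tileLoopA_ne_nil (i t s : Int) (fuel : Nat) (cur : Int) :
    tileLoopA i t s fuel cur ≠ [] := by
  cases fuel with
  | zero => simp [tileLoopA]
  | succ n =>
    unfold tileLoopA
    split_ifs <;> simp

/-- Under stride > 0 and enough fuel, A's loop emits exactly the stride-multiples
from `cur` that stay ≤ image_dim - tile_dim. -/
lemma mem_tileLoopA (i t s : Int) (hs : 0 < s) :
    ∀ (fuel : Nat) (cur : Int), cur ≤ i - t → i - t - cur < fuel →
      ∀ x, x ∈ tileLoopA i t s fuel cur ↔ cur ≤ x ∧ x ≤ i - t ∧ s ∣ x - cur := by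
  intro fuel
  induction fuel with
  | zero => intro cur hle hf x; omega
  | succ n ih =>
    intro cur hle hf x
    unfold tileLoopA
    by_cases h1 : i ≤ cur + t
    · have hcur : cur = i - t := by omega
      simp only [if_pos h1, List.mem_singleton]
      constructor
      · rintro rfl; exact ⟨le_refl _, by omega, ⟨0, by ring⟩⟩
      · rintro ⟨ha, hb, _⟩; omega
    · simp only [if_neg h1]
      by_cases h2 : i - t < cur + s
      · simp only [if_pos h2, List.mem_singleton]
        constructor
        · rintro rfl; exact ⟨le_refl _, by omega, ⟨0, by ring⟩⟩
        · rintro ⟨ha, hb, hd⟩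
          by_contra hne
          have hlt : 0 < x - cur := by
            rcases lt_or_eq_of_le ha with h | h
            · omega
            · exact absurd h.symm hne
          have := Int.le_of_dvd hlt hd
          omega
      · simp only [if_neg h2, List.mem_cons]
        rw [ih (cur + s) (by omega) (by omega) x]
        constructor
        · rintro (rfl | ⟨ha, hb, hd⟩)
          · exact ⟨le_refl _, by omega, ⟨0, by ring⟩⟩
          · refine ⟨by omega, hb, ?_⟩
            obtain ⟨k, hk⟩ := hd
            exact ⟨k + 1, by linarith⟩
        · rintro ⟨ha, hb, hd⟩
          rcases lt_or_eq_of_le ha with hlt | heq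
          · right
            have hsle : s ≤ x - cur := Int.le_of_dvd (by omega) hd
            refine ⟨by omega, hb, ?_⟩
            obtain ⟨k, hk⟩ := hd
            exact ⟨k - 1, by linarith⟩
          · left; omega

/-- Membership in B's multiples list. -/
lemma mem_multiples (n s : Int) (hs : 0 < s) (x : Int) :
    x ∈ (PySem.List.pyRange 0 (n + 1) 1).map (fun k => k * s) ↔
      0 ≤ x ∧ x ≤ n * s ∧ s ∣ x := by
  simp only [List.mem_map, PySem.List.mem_pyRange_one]
  constructor
  · rintro ⟨k, ⟨hk0, hk1⟩, rfl⟩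
    exact ⟨mul_nonneg hk0 hs.le,
      mul_le_mul_of_nonneg_right (by omega) hs.le, ⟨k, mul_comm _ _⟩⟩
  · rintro ⟨hx0, hxL, k, rfl⟩
    refine ⟨k, ⟨?_, ?_⟩, mul_comm _ _⟩
    · by_contra hk; push_neg at hk; nlinarith
    · by_contra hk; push_neg at hk
      have : (n + 1) * s ≤ k * s := mul_le_mul_of_nonneg_right (by omega) hs.le
      nlinarith

/-- B's multiples list is strictly increasing. -/
lemma pairwise_multiples (n s : Int) (hs : 0 < s) :
    ((PySem.List.pyRange 0 (n + 1) 1).map (fun k => k * s)).Pairwise (· < ·) := by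
  refine List.Pairwise.map _ ?_ (PySem.List.pairwise_lt_pyRange_one 0 (n + 1))
  intro a b hab
  exact mul_lt_mul_of_pos_right hab hs

-- ===== VERDICT (by name: the statement is the Claim_ definition above) =====

theorem calculate_tile_positions_py_spec : Claim_equal_calculate_tile_positions_py := by
  intro i t o _ hpre
  unfold Spec_calculate_tile_positions_py calculate_tile_positions_py calculate_tile_positions_py_alt
  by_cases h : i ≤ t
  · simp [h]
  · simp only [if_neg h]
    have ht : t < i := by omega
    have hs : 0 < t - o := by rcases hpre with h' | h' <;> omega
    set s := t - o with hsdef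
    set L := i - t with hLdef
    have hL : 0 < L := by omega
    set n := PySem.Int.floordiv L s with hndef
    have hbr : n * s ≤ L ∧ L < (n + 1) * s :=
      (PySem.Int.floordiv_eq_iff_of_pos hs).mp hndef.symm
    -- A side: the loop followed by the fixup
    set loop := tileLoopA i t s (L.toNat + 1) 0 with hloopdef
    have hmemloop : ∀ x, x ∈ loop ↔ 0 ≤ x ∧ x ≤ L ∧ s ∣ x := by
      intro x
      have := mem_tileLoopA i t s hs (L.toNat + 1) 0 (by omega) (by omega) x
      simpa using this
    have hne : loop ≠ [] := tileLoopA_ne_nil _ _ _ _ _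
    have hlast_mem : loop.getLastD 0 ∈ loop := by
      rcases List.exists_cons_of_ne_nil hne with ⟨a, l, hl⟩
      rw [hl]
      have h' : (a::l).getLast? = some ((a::l).getLastD 0) := by
        rcases h'' : (a::l).getLast? with _ | x
        · simp at h''
        · simp [List.getLastD_eq_getLast?, h'']
      exact List.mem_of_getLast? h'
    set last := loop.getLastD 0 with hlastdef
    have hlast_le : last ≤ L := ((hmemloop last).mp hlast_mem).2.1
    set full := if last + t < i then loop ++ [L] else loop with hfulldef
    have hmemfull : ∀ x, x ∈ full ↔ (0 ≤ x ∧ x ≤ L ∧ s ∣ x) ∨ x = L := by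
      intro x
      rw [hfulldef]
      split_ifs with hfix
      · simp [hmemloop x]
      · have hlastL : last = L := by omega
        rw [hmemloop x]
        constructor
        · exact Or.inl
        · rintro (hx | rfl)
          · exact hx
          · have h2 := (hmemloop last).mp hlast_mem
            rw [hlastL] at h2
            exact h2
    -- B side: the explicit list
    set ms := (PySem.List.pyRange 0 (n + 1) 1).map (fun k => k * s) with hmsdef
    have hmemms : ∀ x, x ∈ ms ↔ 0 ≤ x ∧ x ≤ n * s ∧ s ∣ x := fun x =>
      mem_multiples n s hs x
    have hpairms : ms.Pairwise (· < ·) := pairwise_multiples n s hs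
    set B := if PySem.Int.mod L s ≠ 0 then ms ++ [L] else ms with hBdef
    have hdvd_iff : PySem.Int.mod L s = 0 ↔ s ∣ L := PySem.Int.mod_eq_zero_iff_dvd L s
    have hmemB : ∀ x, x ∈ B ↔ (0 ≤ x ∧ x ≤ L ∧ s ∣ x) ∨ x = L := by
      intro x
      rw [hBdef]
      split_ifs with hmod
      · have hnd : ¬ s ∣ L := fun hd => hmod (hdvd_iff.mpr hd)
        have hlt : n * s < L := by
          rcases lt_or_eq_of_le hbr.1 with h' | h'
          · exact h'
          · exact absurd ⟨n, by linarith [h']⟩ hnd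
        simp only [List.mem_append, List.mem_singleton, hmemms x]
        constructor
        · rintro (⟨ha, hb, hd⟩ | rfl)
          · exact Or.inl ⟨ha, by omega, hd⟩
          · exact Or.inr rfl
        · rintro (⟨ha, hb, hd⟩ | rfl)
          · left
            refine ⟨ha, ?_, hd⟩
            obtain ⟨k, hk⟩ := hd
            have : k ≤ n := by
              by_contra hk'; push_neg at hk'
              have : (n + 1) * s ≤ k * s := mul_le_mul_of_nonneg_right (by omega) hs.le
              nlinarith [hbr.2]
            calc x = k * s := by linarith [hk]
              _ ≤ n * s := mul_le_mul_of_nonneg_right this hs.le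
          · exact Or.inr rfl
      · push_neg at hmod
        have hd : s ∣ L := hdvd_iff.mp hmod
        have hLn : L = n * s := by
          obtain ⟨k, hk⟩ := hd
          have hkn : k = n := by
            by_cases hkn' : k ≤ n
            · by_contra hne'
              have hkl : k ≤ n - 1 := by omega
              have : k * s ≤ (n - 1) * s := mul_le_mul_of_nonneg_right hkl hs.le
              nlinarith [hbr.1]
            · push_neg at hkn'
              have : (n + 1) * s ≤ k * s := mul_le_mul_of_nonneg_right (by omega) hs.le
              nlinarith [hbr.2]
          rw [hk, hkn, mul_comm]
        rw [hmemms x, hLn]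
        constructor
        · rintro ⟨ha, hb, hd'⟩; exact Or.inl ⟨ha, hb, hd'⟩
        · rintro (⟨ha, hb, hd'⟩ | rfl)
          · exact ⟨ha, hb, hd'⟩
          · exact ⟨by nlinarith, le_refl _, ⟨n, mul_comm _ _⟩⟩
    have hpairB : B.Pairwise (· < ·) := by
      rw [hBdef]
      split_ifs with hmod
      · have hnd : ¬ s ∣ L := fun hd => hmod (hdvd_iff.mpr hd)
        have hlt : n * s < L := by
          rcases lt_or_eq_of_le hbr.1 with h' | h'
          · exact h'
          · exact absurd ⟨n, by linarith [h']⟩ hnd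
        rw [List.pairwise_append]
        refine ⟨hpairms, List.pairwise_singleton _ _, ?_⟩
        intro x hx y hy
        simp only [List.mem_singleton] at hy
        subst hy
        obtain ⟨_, hb, _⟩ := (hmemms x).mp hx
        omega
      · exact hpairms
    have hBnodup : B.Nodup := hpairB.imp ne_of_lt
    -- conclude: A's sorted-set equals B's explicit strictly-sorted list
    have hperm : B.Perm (PySem.Set.ofList full) := by
      refine (List.perm_ext_iff_of_nodup hBnodup (PySem.Set.nodup_ofList _)).mpr ?_
      intro x
      rw [PySem.Set.mem_ofList, hmemB x, hmemfull x]
    exact PySem.List.sorted_eq_of_perm_of_pairwise_lt (PySem.Set.ofList full) B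
      (fun x : Int => x) hperm hpairB
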